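-- pv_equiv track=rewrite | github.com/SanyaShilov/ProjectEuler | old_python/problem191.py | iteration
-- ===== SOURCE A (Python) =====
-- def iteration (lst):
--     newar =  [[0, 0, 0],
--               [0, 1, 0],
--               [0, 2, 0],
--               [1, 0, 0],
--               [1, 1, 0],
--               [1, 2, 0]]
--     '''
--     for k in lst[:]:
--         if k[0]:
--             newar.append([1, 0]) # On time
--             if k[1] != 2:
--                 newar.append([1, k[1]+1]) # Absent
--         else:
--             newar.append([1, 0]) # Late
--             newar.append([0, 0]) # On time
--             if k[1] != 2:
--                 newar.append([0, k[1]+1]) # Absent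
--
--         '''
--     for k in lst:
--         num = k[2]
--         if k[0]:
--             newar[3][2] += num # On time
--             if k[1] == 0:
--                 newar[4][2] += num # Absent
--             if k[1] == 1:
--                 newar[5][2] += num # Absent
--         else:
--             newar[0][2] += num # On time
--             newar[3][2] += num # Late
--             if k[1] == 0:
--                 newar[1][2] += num # Absent
--             if k[1] == 1:
--                 newar[2][2] += num # Absent
--     return newar
-- ===== SOURCE B (Python) =====
-- def iteration(lst):
--     total3 = sum(k[2] for k in lst)
--     row0 = sum(k[2] for k in lst if not k[0])
--     row1 = sum(k[2] for k in lst if not k[0] and k[1] == 0)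
--     row2 = sum(k[2] for k in lst if not k[0] and k[1] == 1)
--     row4 = sum(k[2] for k in lst if k[0] and k[1] == 0)
--     row5 = sum(k[2] for k in lst if k[0] and k[1] == 1)
--     return [[0, 0, row0],
--             [0, 1, row1],
--             [0, 2, row2],
--             [1, 0, total3],
--             [1, 1, row4],
--             [1, 2, row5]]
-- ===== Notes on version B (the rewrite author's own statement) =====
-- stated objective: alternative
-- what changed: Replaces the single mutation-driven pass over a 6-row array with six independent filtered sums (one per third-column total) assembled into a fixed literal result.
import Mathlib
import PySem

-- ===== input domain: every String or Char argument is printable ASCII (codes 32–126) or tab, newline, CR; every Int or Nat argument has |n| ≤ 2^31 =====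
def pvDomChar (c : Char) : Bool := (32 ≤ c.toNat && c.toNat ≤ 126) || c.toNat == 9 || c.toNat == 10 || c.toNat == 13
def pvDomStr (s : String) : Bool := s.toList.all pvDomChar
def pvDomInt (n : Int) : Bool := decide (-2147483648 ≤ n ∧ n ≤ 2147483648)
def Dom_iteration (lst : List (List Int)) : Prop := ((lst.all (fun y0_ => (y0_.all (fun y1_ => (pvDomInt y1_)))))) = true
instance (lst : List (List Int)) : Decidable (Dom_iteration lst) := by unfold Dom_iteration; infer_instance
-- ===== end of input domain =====

-- B replaces A's single mutation-driven pass with six independent filtered sums; alternative decomposition, same cost.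


-- ===== PORT A =====
-- newar[i][2] += num, as Python's in-place update of the i-th row's third entry
def addAt (ar : List (List Int)) (i : Nat) (num : Int) : List (List Int) :=
  ar.set i ((ar.getD i []).set 2 ((ar.getD i []).getD 2 0 + num))

-- one loop-body of A's 'for k in lst'; rows shorter than 3 raise IndexError in Python (excluded by Pre_)
def stepA (ar : List (List Int)) (k : List Int) : List (List Int) :=
  match k with
  | a :: b :: c :: _ =>
    let num := c
    if a ≠ 0 then
      let ar1 := addAt ar 3 num
      let ar2 := if b = 0 then addAt ar1 4 num else ar1
      if b = 1 then addAt ar2 5 num else ar2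
    else
      let ar1 := addAt ar 0 num
      let ar2 := addAt ar1 3 num
      let ar3 := if b = 0 then addAt ar2 1 num else ar2
      if b = 1 then addAt ar3 2 num else ar3
  | _ => ar

def iteration (lst : List (List Int)) : List (List Int) :=
  lst.foldl stepA [[0, 0, 0], [0, 1, 0], [0, 2, 0], [1, 0, 0], [1, 1, 0], [1, 2, 0]]

-- ===== PORT B =====
def col2 (k : List Int) : Int := k.getD 2 0

def iteration_alt (lst : List (List Int)) : List (List Int) :=
  let total3 := (lst.map col2).sum
  let row0 := ((lst.filter (fun k => k.getD 0 0 = 0)).map col2).sum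
  let row1 := ((lst.filter (fun k => k.getD 0 0 = 0 ∧ k.getD 1 0 = 0)).map col2).sum
  let row2 := ((lst.filter (fun k => k.getD 0 0 = 0 ∧ k.getD 1 0 = 1)).map col2).sum
  let row4 := ((lst.filter (fun k => k.getD 0 0 ≠ 0 ∧ k.getD 1 0 = 0)).map col2).sum
  let row5 := ((lst.filter (fun k => k.getD 0 0 ≠ 0 ∧ k.getD 1 0 = 1)).map col2).sum
  [[0, 0, row0], [0, 1, row1], [0, 2, row2], [1, 0, total3], [1, 1, row4], [1, 2, row5]]

-- ===== PRECONDITION & SPEC =====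
-- Pre_ excludes rows shorter than 3, on which Python A raises IndexError (k[0]/k[1]/k[2]).
def Pre_iteration (lst : List (List Int)) : Prop := ∀ k ∈ lst, 3 ≤ k.length
instance (lst : List (List Int)) : Decidable (Pre_iteration lst) := by unfold Pre_iteration; infer_instance
def pvWitness_iteration : List (List Int) := [[1, 0, 5], [0, 1, 2]]

def Spec_iteration (lst : List (List Int)) (out : List (List Int)) : Prop := out = iteration_alt lst
instance (lst : List (List Int)) (out : List (List Int)) : Decidable (Spec_iteration lst out) := by unfold Spec_iteration; infer_instance

-- ===== CLAIM (what is proved, stated in full; the proofs are below) =====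
def Claim_equal_iteration : Prop := ∀ (lst : List (List Int)), Dom_iteration lst → Pre_iteration lst → Spec_iteration lst (iteration lst)

-- ===== LEMMAS AND PROOFS =====
-- generalized invariant: folding A's step over lst adds B's six sums to arbitrary starting totals
theorem foldA_shape (lst : List (List Int)) (r0 r1 r2 r3 r4 r5 : Int)
    (h : ∀ k ∈ lst, 3 ≤ k.length) :
    lst.foldl stepA [[0, 0, r0], [0, 1, r1], [0, 2, r2], [1, 0, r3], [1, 1, r4], [1, 2, r5]] =
      [[0, 0, r0 + ((lst.filter (fun k => k.getD 0 0 = 0)).map col2).sum],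
       [0, 1, r1 + ((lst.filter (fun k => k.getD 0 0 = 0 ∧ k.getD 1 0 = 0)).map col2).sum],
       [0, 2, r2 + ((lst.filter (fun k => k.getD 0 0 = 0 ∧ k.getD 1 0 = 1)).map col2).sum],
       [1, 0, r3 + (lst.map col2).sum],
       [1, 1, r4 + ((lst.filter (fun k => k.getD 0 0 ≠ 0 ∧ k.getD 1 0 = 0)).map col2).sum],
       [1, 2, r5 + ((lst.filter (fun k => k.getD 0 0 ≠ 0 ∧ k.getD 1 0 = 1)).map col2).sum]] := by
  induction lst generalizing r0 r1 r2 r3 r4 r5 with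
  | nil => simp
  | cons k t ih =>
    obtain ⟨a, b, c, rest, rfl⟩ : ∃ a b c rest, k = a :: b :: c :: rest := by
      have hk := h k (List.mem_cons_self ..)
      match k with
      | a :: b :: c :: rest => exact ⟨a, b, c, rest, rfl⟩
    have ht : ∀ k ∈ t, 3 ≤ k.length := fun k hk => h k (List.mem_cons_of_mem _ hk)
    by_cases ha : a = 0 <;> by_cases hb0 : b = 0 <;> by_cases hb1 : b = 1 <;>
      simp [stepA, addAt, ha, hb0, hb1, ih _ _ _ _ _ _ ht, col2] <;> ring_nf <;> simp [add_assoc, add_left_comm]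

-- ===== VERDICT (by name: the statement is the Claim_ definition above) =====
theorem iteration_spec : Claim_equal_iteration := by
  intro lst _ hpre
  unfold Spec_iteration iteration iteration_alt
  simpa using foldA_shape lst 0 0 0 0 0 0 hpre
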